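-- pv_equiv track=rewrite | github.com/heurtay/UP | Новая папка (9)/УП6/УП6.py | check_letters
-- ===== SOURCE A (Python) =====
-- def check_letters(s: str):
--     s = s.lower()
--     noliki = []
--
--     for i in range(26):
--         target = chr(ord("a") + i)
--         if target in s:
--             noliki.append(1)
--         else:
--             noliki.append(0)
--     l = ''.join([str(i) for i in noliki])
--     return l
-- ===== SOURCE B (Python) =====
-- def check_letters(s: str):
--     flags = [False] * 26
--     for c in s.lower():
--         o = ord(c)
--         if 97 <= o <= 122:
--             flags[o - 97] = True
--     return ''.join('1' if f else '0' for f in flags)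
-- ===== Notes on version B (the rewrite author's own statement) =====
-- stated objective: alternative
-- what changed: Instead of looping over the 26 letters and scanning the string once per letter with a substring test, B makes a single pass over the lowercased string setting entries of a 26-element boolean flag table, then renders the table as the result string.
import Mathlib
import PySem

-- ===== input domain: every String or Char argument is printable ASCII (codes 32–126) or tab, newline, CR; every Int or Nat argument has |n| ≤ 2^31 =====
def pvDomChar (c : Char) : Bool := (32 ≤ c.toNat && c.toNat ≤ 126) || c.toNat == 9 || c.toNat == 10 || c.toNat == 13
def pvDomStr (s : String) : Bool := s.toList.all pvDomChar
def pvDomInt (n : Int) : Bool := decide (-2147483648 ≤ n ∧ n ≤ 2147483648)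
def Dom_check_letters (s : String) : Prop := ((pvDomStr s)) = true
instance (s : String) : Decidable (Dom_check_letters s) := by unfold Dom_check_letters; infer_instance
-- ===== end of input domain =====

-- B replaces A's per-letter substring scans of s with one pass over the lowercased string setting a 26-entry flag table (alternative decomposition).


-- ===== PORT A =====
def check_letters (s : String) : String :=
  let sl := PySem.Str.lower s
  let noliki : List Int := (PySem.List.pyRange 0 26 1).foldl
    (fun acc i => acc ++ [if PySem.Str.isIn (String.ofList [Char.ofNat (97 + i).toNat]) sl then (1 : Int) else 0]) []
  PySem.Str.join "" (noliki.map (fun i => PySem.Int.toStr i))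

-- ===== PORT B =====
def check_letters_alt (s : String) : String :=
  let flags : List Bool := (PySem.Chars.lower s.toList).foldl
    (fun fl c => if 97 ≤ c.toNat ∧ c.toNat ≤ 122 then fl.set (c.toNat - 97) true else fl)
    (List.replicate 26 false)
  String.ofList (flags.map (fun f => if f then '1' else '0'))

-- ===== PRECONDITION & SPEC =====
def Spec_check_letters (s : String) (out : String) : Prop := out = check_letters_alt s
instance (s : String) (out : String) : Decidable (Spec_check_letters s out) := by unfold Spec_check_letters; infer_instance

-- ===== CLAIM (what is proved, stated in full; the proofs are below) =====
def Claim_equal_check_letters : Prop := ∀ (s : String), Dom_check_letters s → Spec_check_letters s (check_letters s)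

-- ===== LEMMAS AND PROOFS =====

-- B's per-character update step.
def pvStep (fl : List Bool) (c : Char) : List Bool :=
  if 97 ≤ c.toNat ∧ c.toNat ≤ 122 then fl.set (c.toNat - 97) true else fl

lemma pvStep_length (fl : List Bool) (c : Char) : (pvStep fl c).length = fl.length := by
  unfold pvStep; split <;> simp

lemma pvFoldl_length (cs : List Char) : ∀ fl : List Bool, (cs.foldl pvStep fl).length = fl.length := by
  induction cs with
  | nil => intro fl; rfl
  | cons c cs ih => intro fl; rw [List.foldl_cons, ih, pvStep_length]

-- the flag table after the pass: flag i is set iff some character hits slot i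
lemma pvFoldl_getD (cs : List Char) : ∀ (fl : List Bool) (i : Nat), i < fl.length →
    (cs.foldl pvStep fl).getD i false =
      (fl.getD i false || cs.any (fun c => decide (97 ≤ c.toNat ∧ c.toNat ≤ 122 ∧ c.toNat - 97 = i))) := by
  induction cs with
  | nil => intro fl i _; simp
  | cons c cs ih =>
    intro fl i hi
    rw [List.foldl_cons, ih _ i (by rw [pvStep_length]; exact hi), List.any_cons]
    have hstep : (pvStep fl c).getD i false =
        (fl.getD i false || decide (97 ≤ c.toNat ∧ c.toNat ≤ 122 ∧ c.toNat - 97 = i)) := by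
      unfold pvStep
      by_cases hr : 97 ≤ c.toNat ∧ c.toNat ≤ 122
      · by_cases hj : c.toNat - 97 = i
        · rw [if_pos hr, hj]
          simp [List.getD, hi, hr]
        · rw [if_pos hr]
          simp [List.getD, List.getElem?_set_ne hj, hr, hj]
      · rw [if_neg hr,
            decide_eq_false (show ¬(97 ≤ c.toNat ∧ c.toNat ≤ 122 ∧ c.toNat - 97 = i) from
              fun h => hr ⟨h.1, h.2.1⟩), Bool.or_false]
    rw [hstep, Bool.or_assoc]

lemma pvChar_toNat (k : Nat) (h : k < 26) : (Char.ofNat (97 + k)).toNat = 97 + k := by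
  rw [Char.toNat_ofNat, if_pos]; left; omega

lemma pvSingleton_infix (c : Char) (s : List Char) : [c] <:+: s ↔ c ∈ s := by
  constructor
  · intro h; exact h.mem (by simp)
  · intro h; obtain ⟨a, b, rfl⟩ := List.mem_iff_append.mp h; exact ⟨a, b, by simp⟩

-- per-letter agreement: A's substring test equals B's flag for slot k
lemma pvCond_eq (s : String) (k : Nat) (hk : k < 26) :
    PySem.Str.isIn (String.ofList [Char.ofNat (97 + (k : Int)).toNat]) (PySem.Str.lower s)
      = (PySem.Chars.lower s.toList).any
          (fun c => decide (97 ≤ c.toNat ∧ c.toNat ≤ 122 ∧ c.toNat - 97 = k)) := by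
  have hcast : (97 + (k : Int)).toNat = 97 + k := by omega
  rw [hcast, Bool.eq_iff_iff, PySem.Str.isIn_iff_infix, List.any_eq_true]
  have htl : (PySem.Str.lower s).toList = PySem.Chars.lower s.toList := by simp [pysem]
  rw [htl]
  simp only [String.toList_ofList]
  rw [pvSingleton_infix]
  constructor
  · intro hm
    refine ⟨_, hm, ?_⟩
    have := pvChar_toNat k hk
    simp only [this]
    exact decide_eq_true (by omega)
  · rintro ⟨c, hc, hd⟩
    have hd' := of_decide_eq_true hd
    have hct : c.toNat = 97 + k := by omega
    have : c = Char.ofNat (97 + k) := by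
      apply Char.ext
      apply UInt32.toNat_inj.mp
      rw [show (Char.ofNat (97+k)).val.toNat = (Char.ofNat (97+k)).toNat from rfl,
          pvChar_toNat k hk]
      exact hct
    rwa [← this]

lemma pvJoin_map (g : Nat → Char) (l : List Nat) :
    (PySem.Str.join "" (l.map (fun k => String.ofList [g k]))).toList = l.map g := by
  have h : l.map (fun k => String.ofList [g k]) = (l.map g).map (fun c => String.ofList [c]) := by
    rw [List.map_map]; rfl
  rw [h]
  generalize l.map g = m
  simp [pysem, Function.comp_def, PySem.Chars.join_nil_singletons]

-- ===== VERDICT (by name: the statement is the Claim_ definition above) =====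
theorem check_letters_spec : Claim_equal_check_letters := by
  intro s _
  unfold Spec_check_letters check_letters check_letters_alt
  apply String.toList_inj.mp
  dsimp only
  -- A side
  rw [PySem.List.foldl_append_singleton_eq_map, List.nil_append,
      show PySem.List.pyRange 0 26 1 = (List.range 26).map (Nat.cast) from
        PySem.List.pyRange_zero_natCast 26,
      List.map_map, List.map_map]
  have hone : ∀ b : Bool, PySem.Int.toStr (if b then 1 else 0) = String.ofList [if b then '1' else '0'] := by
    intro b; cases b <;> decide
  simp only [Function.comp_def, hone]
  rw [pvJoin_map]
  -- B side
  rw [String.toList_ofList,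
      show (fun (fl : List Bool) (c : Char) =>
        if 97 ≤ c.toNat ∧ c.toNat ≤ 122 then fl.set (c.toNat - 97) true else fl) = pvStep from rfl]
  set cs := PySem.Chars.lower s.toList with hcs
  have hflags : cs.foldl pvStep (List.replicate 26 false)
      = (List.range 26).map (fun i => cs.any (fun c => decide (97 ≤ c.toNat ∧ c.toNat ≤ 122 ∧ c.toNat - 97 = i))) := by
    apply List.ext_getElem
    · rw [pvFoldl_length]; simp
    · intro i h1 h2
      have hi26 : i < 26 := by
        have := h1; rw [pvFoldl_length] at this; simpa using this
      have hg := pvFoldl_getD cs (List.replicate 26 false) i (by simp [hi26])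
      have hrep : (List.replicate 26 false).getD i false = false := by
        rw [List.getD_eq_getElem _ _ (by simp [hi26]), List.getElem_replicate]
      rw [List.getD_eq_getElem _ _ h1, hrep, Bool.false_or] at hg
      rw [hg]
      simp
  rw [hflags, List.map_map]
  apply List.map_congr_left
  intro k hk
  have hk26 : k < 26 := List.mem_range.mp hk
  simp only [Function.comp_def]
  rw [pvCond_eq s k hk26]
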